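-- pv_equiv track=rewrite | github.com/wielgos/WDI | zestaw4/cw18.py | znajdz
-- ===== SOURCE A (Python) =====
-- def znajdz(t):
--     res = t[0][0]   #[0] for rows, [1] for cols
--
--     for i in range(len(t)):
--         for j in range(len(t)):
--             temp_row = t[i][j]
--             count = 1
--             while count < 10 and count + j < len(t):
--                 temp_row += t[i][j + count]
--                 count += 1
--                 if temp_row > res:
--                     res = temp_row
--     return res
-- ===== SOURCE B (Python) =====
-- def znajdz(t):
--     n = len(t)
--     res = t[0][0]
--     for row in t:
--         P = [0]
--         for x in row[:n]:
--             P.append(P[-1] + x)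
--         for j in range(n):
--             for L in range(2, 11):
--                 if j + L <= n:
--                     s = P[j + L] - P[j]
--                     if s > res:
--                         res = s
--     return res
-- ===== Notes on version B (the rewrite author's own statement) =====
-- stated objective: alternative
-- what changed: Replaces A's running-accumulator while-loop per start index by a per-row prefix-sum table, reading each window sum of length 2..10 as a difference of two prefix sums.
import Mathlib
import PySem

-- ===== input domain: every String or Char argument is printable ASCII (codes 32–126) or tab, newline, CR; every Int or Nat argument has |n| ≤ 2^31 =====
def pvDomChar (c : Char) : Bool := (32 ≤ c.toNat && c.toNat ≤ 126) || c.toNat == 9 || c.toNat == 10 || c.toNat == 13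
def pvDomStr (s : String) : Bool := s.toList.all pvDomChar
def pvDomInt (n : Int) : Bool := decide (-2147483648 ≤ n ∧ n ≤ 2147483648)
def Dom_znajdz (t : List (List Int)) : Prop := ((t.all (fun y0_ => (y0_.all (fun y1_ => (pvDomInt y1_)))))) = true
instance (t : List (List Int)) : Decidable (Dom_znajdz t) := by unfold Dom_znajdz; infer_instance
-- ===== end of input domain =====

-- B replaces A's running-accumulator inner while-loop by a per-row prefix-sum table,
-- reading each window sum (lengths 2..10, confined to the first len(t) columns) as a
-- difference of two prefix sums; same cost, different decomposition.

-- ===== PORT A =====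
-- inner while-loop of A; indexing via pyGetD is exact under Pre_znajdz (all accessed
-- indices are then in range, so no IndexError occurs inside Pre_).
def znajdzWhile (row : List Int) (n j : Int) (count : Nat) (temp res : Int) : Int :=
  if h : count < 10 ∧ (count : Int) + j < n then
    let temp' := temp + PySem.List.pyGetD row (j + (count : Int)) 0
    znajdzWhile row n j (count + 1) temp' (if temp' > res then temp' else res)
  else res
termination_by 10 - count
decreasing_by omega

def znajdz (t : List (List Int)) : Int :=
  let n : Int := t.length
  let res0 := PySem.List.pyGetD (PySem.List.pyGetD t 0 []) 0 0
  (PySem.List.pyRange 0 n 1).foldl (fun res i =>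
    let row := PySem.List.pyGetD t i []
    (PySem.List.pyRange 0 n 1).foldl (fun res j =>
      znajdzWhile row n j 1 (PySem.List.pyGetD row j 0) res) res) res0

-- ===== PORT B =====
-- P = [0]; for x in r: P.append(P[-1] + x)
def znajdzPrefix (r : List Int) : List Int :=
  r.foldl (fun P x => P ++ [PySem.List.pyGetD P (-1) 0 + x]) [0]

def znajdz_alt (t : List (List Int)) : Int :=
  let n : Int := t.length
  let res0 := PySem.List.pyGetD (PySem.List.pyGetD t 0 []) 0 0
  t.foldl (fun res row =>
    let P := znajdzPrefix (PySem.List.slice row none (some n))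
    (PySem.List.pyRange 0 n 1).foldl (fun res j =>
      (PySem.List.pyRange 2 11 1).foldl (fun res L =>
        if j + L ≤ n then
          let s := PySem.List.pyGetD P (j + L) 0 - PySem.List.pyGetD P j 0
          if s > res then s else res
        else res) res) res) res0

-- ===== PRECONDITION & SPEC =====
-- Exactly the inputs on which the Python A returns: A reads t[0][0] and t[i][j] for all
-- i, j < len(t), so it raises IndexError iff t is empty or some row is shorter than len(t).
def Pre_znajdz (t : List (List Int)) : Prop :=
  t ≠ [] ∧ ∀ row ∈ t, t.length ≤ row.length
instance (t : List (List Int)) : Decidable (Pre_znajdz t) := by unfold Pre_znajdz; infer_instance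

def pvWitness_znajdz : List (List Int) := [[1, -2, 3], [4, 5, -6], [-7, 8, 9]]

def Spec_znajdz (t : List (List Int)) (out : Int) : Prop := out = znajdz_alt t
instance (t : List (List Int)) (out : Int) : Decidable (Spec_znajdz t out) := by unfold Spec_znajdz; infer_instance

-- ===== CLAIM (what is proved, stated in full; the proofs are below) =====
def Claim_equal_znajdz : Prop := ∀ (t : List (List Int)), Dom_znajdz t → Pre_znajdz t → Spec_znajdz t (znajdz t)

-- ===== LEMMAS AND PROOFS =====

-- sum of the window of length L starting at column j of `row`
def pvS (row : List Int) (j L : Nat) : Int := ((row.drop j).take L).sum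

-- common reference loop: fold the windows of lengths L, L+1, …, 10 (clipped at column n)
def pvSpecLoop (row : List Int) (n j res : Int) (L : Int) : Int :=
  if h : L ≤ 10 ∧ L + j ≤ n then
    let s := pvS row j.toNat L.toNat
    pvSpecLoop row n j (if s > res then s else res) (L + 1)
  else res
termination_by (11 - L).toNat
decreasing_by omega

theorem pvS_succ (row : List Int) (j L : Nat) (h : j + L < row.length) :
    pvS row j (L + 1) = pvS row j L + row[j + L] := by
  unfold pvS
  rw [List.take_add_one]
  have h' : (row.drop j)[L]? = some row[j + L] := by
    rw [List.getElem?_drop]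
    exact List.getElem?_eq_getElem h
  simp [h']

theorem pvLemA (row : List Int) (n j : Int) (hj : 0 ≤ j) (hn : n ≤ (row.length : Int)) :
    ∀ (fuel count : Nat), fuel = 10 - count → ∀ (temp res : Int),
      temp = pvS row j.toNat count →
      znajdzWhile row n j count temp res = pvSpecLoop row n j res ((count : Int) + 1) := by
  intro fuel
  induction fuel with
  | zero =>
    intro count hfc temp res htemp
    rw [znajdzWhile, pvSpecLoop]
    rw [dif_neg (by omega), dif_neg (by omega)]
  | succ f ih =>
    intro count hfc temp res htemp
    rw [znajdzWhile, pvSpecLoop]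
    by_cases hc : count < 10 ∧ (count : Int) + j < n
    · rw [dif_pos hc, dif_pos (by omega)]
      have hidx : j + (count : Int) = ((j.toNat + count : Nat) : Int) := by omega
      have hlt : j.toNat + count < row.length := by omega
      have hget : PySem.List.pyGetD row (j + (count : Int)) 0 = row[j.toNat + count] := by
        rw [hidx, PySem.List.pyGetD_natCast, List.getD_eq_getElem?_getD,
          List.getElem?_eq_getElem hlt, Option.getD_some]
      have htemp' : temp + PySem.List.pyGetD row (j + (count : Int)) 0
          = pvS row j.toNat (count + 1) := by
        rw [hget, htemp, pvS_succ row j.toNat count hlt]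
      simp only []
      rw [htemp']
      have hLtoNat : ((count : Int) + 1).toNat = count + 1 := by omega
      rw [hLtoNat]
      have := ih (count + 1) (by omega)
        (pvS row j.toNat (count + 1))
        (if pvS row j.toNat (count + 1) > res then pvS row j.toNat (count + 1) else res) rfl
      rw [this]
      norm_num
    · rw [dif_neg hc, dif_neg (by omega)]

def pvPsums : Int → List Int → List Int
  | _, [] => []
  | s, x :: xs => (s + x) :: pvPsums (s + x) xs

theorem pvBuild_go : ∀ (xs acc : List Int) (s : Int), acc.getLast? = some s →
    xs.foldl (fun P x => P ++ [PySem.List.pyGetD P (-1) 0 + x]) acc = acc ++ pvPsums s xs := by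
  intro xs
  induction xs with
  | nil => intro acc s _; simp [pvPsums]
  | cons x xs ih =>
    intro acc s hlast
    have hne : acc ≠ [] := by
      intro h; rw [h] at hlast; simp at hlast
    have hget : PySem.List.pyGetD acc (-1) 0 = s := by
      rw [PySem.List.pyGetD_neg_one acc 0 hne]
      rw [List.getLast?_eq_some_getLast hne] at hlast
      exact (Option.some_inj.mp hlast)
    simp only [List.foldl_cons, hget]
    rw [ih (acc ++ [s + x]) (s + x) (by simp)]
    simp [pvPsums]

theorem pvPrefix_eq (r : List Int) : znajdzPrefix r = 0 :: pvPsums 0 r := by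
  unfold znajdzPrefix
  exact pvBuild_go r [0] 0 rfl

theorem pvPsums_getElem? : ∀ (xs : List Int) (s : Int) (k : Nat), k < xs.length →
    (pvPsums s xs)[k]? = some (s + (xs.take (k + 1)).sum) := by
  intro xs
  induction xs with
  | nil => intro s k h; simp at h
  | cons x xs ih =>
    intro s k h
    cases k with
    | zero => simp [pvPsums]
    | succ k =>
      simp only [pvPsums, List.getElem?_cons_succ]
      rw [ih (s + x) k (by simpa using h)]
      simp [List.take_succ_cons, add_assoc]

theorem pvP_getD (r : List Int) (m : Nat) (hm : m ≤ r.length) :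
    PySem.List.pyGetD (znajdzPrefix r) (m : Int) 0 = (r.take m).sum := by
  rw [pvPrefix_eq, PySem.List.pyGetD_natCast]
  cases m with
  | zero => simp
  | succ k =>
    rw [List.getD_eq_getElem?_getD]
    simp only [List.getElem?_cons_succ]
    rw [pvPsums_getElem? r 0 k (by omega)]
    simp

theorem pvDiff_eq (row : List Int) (n j L : Int) (hj : 0 ≤ j) (hL : 0 ≤ L)
    (hjL : j + L ≤ n) (hn : n ≤ (row.length : Int)) :
    PySem.List.pyGetD (znajdzPrefix (row.take n.toNat)) (j + L) 0
      - PySem.List.pyGetD (znajdzPrefix (row.take n.toNat)) j 0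
      = pvS row j.toNat L.toNat := by
  set r := row.take n.toNat with hr
  have hrlen : r.length = n.toNat := by
    rw [hr, List.length_take]; omega
  have e1 : PySem.List.pyGetD (znajdzPrefix r) (j + L) 0 = (r.take (j.toNat + L.toNat)).sum := by
    conv_lhs => rw [show j + L = ((j.toNat + L.toNat : Nat) : Int) from by omega]
    exact pvP_getD r (j.toNat + L.toNat) (by omega)
  have e2 : PySem.List.pyGetD (znajdzPrefix r) j 0 = (r.take j.toNat).sum := by
    conv_lhs => rw [show j = ((j.toNat : Nat) : Int) from by omega]
    exact pvP_getD r j.toNat (by omega)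
  rw [e1, e2]
  rw [List.take_add, List.sum_append]
  have h3 : ((r.drop j.toNat).take L.toNat) = ((row.drop j.toNat).take L.toNat) := by
    rw [hr, List.drop_take, List.take_take]
    congr 1
    omega
  rw [h3]
  unfold pvS
  ring

theorem pvLemB0 (n j : Int) (P : List Int) :
    ∀ (fuel : Nat) (L : Int) (res : Int), fuel = (11 - L).toNat → n < j + L →
      (PySem.List.pyRange L 11 1).foldl (fun res L =>
        if j + L ≤ n then
          let s := PySem.List.pyGetD P (j + L) 0 - PySem.List.pyGetD P j 0
          if s > res then s else res
        else res) res = res := by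
  intro fuel
  induction fuel with
  | zero =>
    intro L res hf hn
    rw [PySem.List.pyRange_one_eq_nil (by omega)]
    rfl
  | succ f ih =>
    intro L res hf hn
    by_cases hL : L < 11
    · rw [PySem.List.pyRange_one_cons hL, List.foldl_cons]
      rw [if_neg (by omega)]
      exact ih (L + 1) res (by omega) (by omega)
    · rw [PySem.List.pyRange_one_eq_nil (by omega)]
      rfl

theorem pvLemB (row : List Int) (n j : Int) (hj : 0 ≤ j) (hn : n ≤ (row.length : Int)) :
    ∀ (fuel : Nat) (L : Int) (res : Int), fuel = (11 - L).toNat → 2 ≤ L →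
      (PySem.List.pyRange L 11 1).foldl (fun res L =>
        if j + L ≤ n then
          let s := PySem.List.pyGetD (znajdzPrefix (row.take n.toNat)) (j + L) 0
            - PySem.List.pyGetD (znajdzPrefix (row.take n.toNat)) j 0
          if s > res then s else res
        else res) res = pvSpecLoop row n j res L := by
  intro fuel
  induction fuel with
  | zero =>
    intro L res hf hL2
    rw [PySem.List.pyRange_one_eq_nil (by omega), pvSpecLoop, dif_neg (by omega)]
    rfl
  | succ f ih =>
    intro L res hf hL2
    by_cases hL : L < 11
    · rw [PySem.List.pyRange_one_cons hL, List.foldl_cons, pvSpecLoop]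
      by_cases hg : j + L ≤ n
      · rw [if_pos hg, dif_pos (by omega)]
        simp only []
        rw [pvDiff_eq row n j L hj (by omega) hg hn]
        exact ih (L + 1)
          (if pvS row j.toNat L.toNat > res then pvS row j.toNat L.toNat else res)
          (by omega) (by omega)
      · rw [if_neg hg, dif_neg (by omega)]
        exact pvLemB0 n j _ f (L + 1) res (by omega) (by omega)
    · rw [PySem.List.pyRange_one_eq_nil (by omega), pvSpecLoop, dif_neg (by omega)]
      rfl

-- first element of a window: t[i][j] is the length-1 window sum
theorem pvS_one (row : List Int) (n j : Int) (hj : 0 ≤ j) (hjn : j < n)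
    (hn : n ≤ (row.length : Int)) :
    PySem.List.pyGetD row j 0 = pvS row j.toNat 1 := by
  have hlt : j.toNat + 0 < row.length := by omega
  have := pvS_succ row j.toNat 0 hlt
  unfold pvS at this ⊢
  simp only [List.take_zero, List.sum_nil, zero_add] at this
  rw [this]
  conv_lhs => rw [show j = ((j.toNat : Nat) : Int) from by omega]
  rw [PySem.List.pyGetD_natCast, List.getD_eq_getElem?_getD,
    List.getElem?_eq_getElem (by omega : j.toNat < row.length), Option.getD_some]
  simp

theorem pvRow_eq (row : List Int) (n : Int) (hn0 : 0 ≤ n) (hn : n ≤ (row.length : Int))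
    (res : Int) :
    (PySem.List.pyRange 0 n 1).foldl (fun res j =>
        znajdzWhile row n j 1 (PySem.List.pyGetD row j 0) res) res
    = (PySem.List.pyRange 0 n 1).foldl (fun res j =>
        (PySem.List.pyRange 2 11 1).foldl (fun res L =>
          if j + L ≤ n then
            let s := PySem.List.pyGetD (znajdzPrefix (PySem.List.slice row none (some n))) (j + L) 0
              - PySem.List.pyGetD (znajdzPrefix (PySem.List.slice row none (some n))) j 0
            if s > res then s else res
          else res) res) res := by
  apply PySem.List.foldl_congr_mem
  intro acc j hjmem
  have hj := (PySem.List.mem_pyRange_one.mp hjmem)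
  rw [PySem.List.slice_to row hn0]
  rw [pvLemB row n j hj.1 hn 9 2 _ (by omega) (by omega)]
  rw [pvS_one row n j hj.1 hj.2 hn]
  exact pvLemA row n j hj.1 hn 9 1 (by omega) _ acc rfl

-- ===== VERDICT (by name: the statement is the Claim_ definition above) =====
theorem znajdz_spec : Claim_equal_znajdz := by
  intro t _ hpre
  unfold Spec_znajdz znajdz znajdz_alt
  simp only []
  rw [PySem.List.foldl_pyRange_zero_pyGetD' t []
    (fun res row => (PySem.List.pyRange 0 (t.length : Int) 1).foldl (fun res j =>
      znajdzWhile row (t.length : Int) j 1 (PySem.List.pyGetD row j 0) res) res)]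
  apply PySem.List.foldl_congr_mem
  intro acc row hrow
  exact pvRow_eq row (t.length : Int) (by omega)
    (by exact_mod_cast Int.ofNat_le.mpr (hpre.2 row hrow)) acc
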